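-- pv_equiv track=rewrite | github.com/CLMNTDFR/holbertonschool-Markdown2HTML | markdown2html.py | convert_markdown_ol_list_to_html
-- ===== SOURCE A (Python) =====
-- def convert_markdown_ol_list_to_html(lines):
--     """
--     Convert Markdown ordered list syntax to HTML.
--
--     Args:
--         lines (list): List of lines from the Markdown file.
--
--     Returns:
--         list: List of converted lines with HTML ordered list.
--     """
--     in_list = False
--     html_lines = []
--
--     for line in lines:
--         if line.lstrip().startswith(
--             tuple(f"{i}. " for i in range(1, 10))
--         ):  # If line starts with '1. ', '2. ', etc.
--             line_content = line.split(". ", 1)[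
--                 1
--             ].strip()  # Extract text after the number and dot
--             if not in_list:
--                 # Open an <ol> tag for the list
--                 html_lines.append("<ol>\n")
--                 in_list = True
--             # Convert each item to <li>
--             html_lines.append(f"   <li>{line_content}</li>\n")
--         else:
--             if in_list:
--                 # Close the <ol> tag at the end of the list
--                 html_lines.append("</ol>\n")
--                 in_list = False
--             # Add the line without modification
--             html_lines.append(line)
--
--     if in_list:
--         html_lines.append("</ol>\n")
--
--     return html_lines
-- ===== SOURCE B (Python) =====
-- def _is_item(line):
--     return line.lstrip().startswith(tuple(f"{i}. " for i in range(1, 10)))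
--
--
-- def convert_markdown_ol_list_to_html(lines):
--     """Group-then-emit rewrite: scan maximal runs of list items with an
--     index/inner-scan instead of a streaming in_list flag."""
--     html_lines = []
--     i = 0
--     n = len(lines)
--     while i < n:
--         if _is_item(lines[i]):
--             j = i
--             while j < n and _is_item(lines[j]):
--                 j += 1
--             html_lines.append("<ol>\n")
--             for line in lines[i:j]:
--                 html_lines.append(f"   <li>{line.split('. ', 1)[1].strip()}</li>\n")
--             html_lines.append("</ol>\n")
--             i = j
--         else:
--             html_lines.append(lines[i])
--             i += 1
--     return html_lines
-- ===== Notes on version B (the rewrite author's own statement) =====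
-- stated objective: alternative
-- what changed: A's streaming state machine with an in_list flag is replaced by a group-then-emit scan: an index loop finds each maximal run of list-item lines with an inner scan and emits <ol>, the <li> items, </ol> as a block, copying non-item lines through.
import Mathlib
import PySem

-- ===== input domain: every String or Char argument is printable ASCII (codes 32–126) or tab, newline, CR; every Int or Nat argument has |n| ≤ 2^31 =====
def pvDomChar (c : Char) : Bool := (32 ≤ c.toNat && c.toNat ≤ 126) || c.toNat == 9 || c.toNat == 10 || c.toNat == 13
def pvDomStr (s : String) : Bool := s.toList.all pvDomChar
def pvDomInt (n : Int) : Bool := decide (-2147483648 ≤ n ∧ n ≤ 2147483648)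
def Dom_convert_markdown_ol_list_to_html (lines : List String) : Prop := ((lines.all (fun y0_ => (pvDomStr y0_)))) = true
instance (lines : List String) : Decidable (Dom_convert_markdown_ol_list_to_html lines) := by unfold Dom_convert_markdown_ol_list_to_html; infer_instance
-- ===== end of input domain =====

-- B rewrites A's streaming in_list flag machine as a group-then-emit scan over
-- maximal runs of list items (objective: alternative decomposition, same O(n) cost).

-- ===== PORT A =====
-- line.lstrip().startswith(('1. ', …, '9. '))
def pvIsItem (line : String) : Bool :=
  ["1. ", "2. ", "3. ", "4. ", "5. ", "6. ", "7. ", "8. ", "9. "].any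
    (fun p => PySem.Str.startswith (PySem.Str.lstrip line) p)

-- line.split(". ", 1)[1].strip()  (the [1] exists whenever pvIsItem holds; "" is unreachable)
def pvItemContent (line : String) : String :=
  match PySem.Str.splitMax? line ". " 1 with
  | some (_ :: t :: _) => PySem.Str.strip t
  | _ => ""

-- the for-loop of A as structural recursion over the in_list flag, emitting in order
def convertOlGoA (in_list : Bool) (lines : List String) : List String :=
  match lines with
  | [] => if in_list then ["</ol>\n"] else []
  | line :: rest =>
    if pvIsItem line then
      (if in_list then [] else ["<ol>\n"]) ++
        ("   <li>" ++ pvItemContent line ++ "</li>\n") :: convertOlGoA true rest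
    else
      (if in_list then ["</ol>\n"] else []) ++ line :: convertOlGoA false rest

def convert_markdown_ol_list_to_html (lines : List String) : List String :=
  convertOlGoA false lines

-- ===== PORT B =====
-- B's outer while loop: at an item, the inner while-scan is takeWhile/dropWhile of the run
def convertOlGoB (ls : List String) : List String :=
  match ls with
  | [] => []
  | line :: rest =>
    if h : pvIsItem line then
      "<ol>\n" ::
        (((line :: rest).takeWhile pvIsItem).map
          (fun l => "   <li>" ++ pvItemContent l ++ "</li>\n") ++
         "</ol>\n" :: convertOlGoB ((line :: rest).dropWhile pvIsItem))
    else
      line :: convertOlGoB rest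
termination_by ls.length
decreasing_by
  · simp only [List.dropWhile_cons, h, if_true]
    exact Nat.lt_succ_of_le (List.length_dropWhile_le _ _)
  · simp

def convert_markdown_ol_list_to_html_alt (lines : List String) : List String :=
  convertOlGoB lines

-- ===== PRECONDITION & SPEC =====
def Spec_convert_markdown_ol_list_to_html (lines : List String) (out : List String) : Prop := out = convert_markdown_ol_list_to_html_alt lines
instance (lines : List String) (out : List String) : Decidable (Spec_convert_markdown_ol_list_to_html lines out) := by unfold Spec_convert_markdown_ol_list_to_html; infer_instance

-- ===== CLAIM (what is proved, stated in full; the proofs are below) =====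
def Claim_equal_convert_markdown_ol_list_to_html : Prop := ∀ (lines : List String), Dom_convert_markdown_ol_list_to_html lines → Spec_convert_markdown_ol_list_to_html lines (convert_markdown_ol_list_to_html lines)

-- ===== LEMMAS AND PROOFS =====
-- Joint invariant: out of a run A's flag machine agrees with B; inside a run A
-- emits the remaining items of the run, closes the tag, and continues like B.
lemma convertOl_AB : ∀ (n : Nat) (ls : List String), ls.length ≤ n →
    convertOlGoA false ls = convertOlGoB ls ∧
    convertOlGoA true ls =
      (ls.takeWhile pvIsItem).map (fun l => "   <li>" ++ pvItemContent l ++ "</li>\n") ++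
        "</ol>\n" :: convertOlGoB (ls.dropWhile pvIsItem) := by
  intro n
  induction n with
  | zero =>
    intro ls hls
    have : ls = [] := List.eq_nil_of_length_eq_zero (Nat.le_zero.mp hls)
    subst this
    simp [convertOlGoA, convertOlGoB]
  | succ n ih =>
    intro ls hls
    match ls with
    | [] => simp [convertOlGoA, convertOlGoB]
    | line :: rest =>
      have hr : rest.length ≤ n := Nat.le_of_succ_le_succ hls
      by_cases h : pvIsItem line
      · constructor
        · simp only [convertOlGoA, convertOlGoB, h, if_true, dif_pos,
            List.takeWhile_cons, List.dropWhile_cons]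
          simp [(ih rest hr).2]
        · simp only [convertOlGoA, h, if_true,
            List.takeWhile_cons, List.dropWhile_cons]
          simp [(ih rest hr).2]
      · have hB : convertOlGoB (line :: rest) = line :: convertOlGoB rest := by
          rw [convertOlGoB]; simp [h]
        constructor
        · simp only [convertOlGoA, h, if_false]
          simp [(ih rest hr).1, hB]
        · simp only [convertOlGoA, h, List.takeWhile_cons, List.dropWhile_cons]
          simp [(ih rest hr).1, hB, h]

-- ===== VERDICT (by name: the statement is the Claim_ definition above) =====
theorem convert_markdown_ol_list_to_html_spec : Claim_equal_convert_markdown_ol_list_to_html := by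
  intro lines _
  unfold Spec_convert_markdown_ol_list_to_html
  unfold convert_markdown_ol_list_to_html convert_markdown_ol_list_to_html_alt
  exact (convertOl_AB lines.length lines le_rfl).1
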